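-- pv_equiv track=rewrite | github.com/redgen21/AI_Routing | sr_watch_vrp_feedback.py | _trigger_type
-- ===== SOURCE A (Python) =====
-- def _trigger_type(changed_files: list[str]) -> str:
--     normalized = [str(path).lower() for path in changed_files]
--     if any(path.startswith(".claude") or "claude" in path for path in normalized):
--         return "claude_feedback"
--     if any("feedback" in path or "review" in path for path in normalized):
--         return "review_update"
--     if changed_files:
--         return "markdown_update"
--     return "initial_validation"
-- ===== SOURCE B (Python) =====
-- def _trigger_type(changed_files: list[str]) -> str:
--     if not changed_files:
--         return "initial_validation"
--     # One search over a single newline-joined blob of the lowered paths.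
--     # startswith(".claude") is subsumed by the substring "claude", and "\n"
--     # occurs in no needle, so a match in the blob is a match in some path.
--     blob = "\n".join(str(path).lower() for path in changed_files)
--     if "claude" in blob:
--         return "claude_feedback"
--     if "feedback" in blob or "review" in blob:
--         return "review_update"
--     return "markdown_update"
-- ===== Notes on version B (the rewrite author's own statement) =====
-- stated objective: alternative
-- what changed: Instead of scanning the list twice with per-element any() predicates, B joins all lowered paths into one newline-separated string and runs each substring test once over that blob, dropping the redundant startswith('.claude') check (subsumed by 'claude' in path).
import Mathlib
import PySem

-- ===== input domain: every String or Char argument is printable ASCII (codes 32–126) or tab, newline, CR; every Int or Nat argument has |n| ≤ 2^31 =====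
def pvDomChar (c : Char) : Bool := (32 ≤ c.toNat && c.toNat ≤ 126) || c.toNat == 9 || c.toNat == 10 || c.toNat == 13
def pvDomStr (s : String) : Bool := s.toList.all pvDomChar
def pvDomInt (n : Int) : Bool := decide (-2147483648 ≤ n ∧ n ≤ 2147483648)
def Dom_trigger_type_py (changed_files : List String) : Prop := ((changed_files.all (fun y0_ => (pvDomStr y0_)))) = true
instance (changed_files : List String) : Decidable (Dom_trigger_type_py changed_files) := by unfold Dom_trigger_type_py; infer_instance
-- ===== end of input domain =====

-- B joins the lowered paths into one newline-separated blob and runs each substring test once over it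
-- (the startswith('.claude') test is subsumed by the 'claude' substring test); alternative decomposition, same cost.

-- ===== PORT A =====
def trigger_type_py (changed_files : List String) : String :=
  let normalized := changed_files.map (fun path => PySem.Str.lower path)
  if normalized.any (fun path =>
      PySem.Str.startswith path ".claude" || PySem.Str.isIn "claude" path) then
    "claude_feedback"
  else if normalized.any (fun path =>
      PySem.Str.isIn "feedback" path || PySem.Str.isIn "review" path) then
    "review_update"
  else if changed_files ≠ [] then
    "markdown_update"
  else
    "initial_validation"

-- ===== PORT B =====
def trigger_type_py_alt (changed_files : List String) : String :=
  if changed_files = [] then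
    "initial_validation"
  else
    let blob := PySem.Str.join "\n" (changed_files.map (fun path => PySem.Str.lower path))
    if PySem.Str.isIn "claude" blob then
      "claude_feedback"
    else if PySem.Str.isIn "feedback" blob || PySem.Str.isIn "review" blob then
      "review_update"
    else
      "markdown_update"

-- ===== PRECONDITION & SPEC =====
def Spec_trigger_type_py (changed_files : List String) (out : String) : Prop := out = trigger_type_py_alt changed_files
instance (changed_files : List String) (out : String) : Decidable (Spec_trigger_type_py changed_files out) := by unfold Spec_trigger_type_py; infer_instance

-- ===== CLAIM (what is proved, stated in full; the proofs are below) =====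
def Claim_equal_trigger_type_py : Prop := ∀ (changed_files : List String), Dom_trigger_type_py changed_files → Spec_trigger_type_py changed_files (trigger_type_py changed_files)

-- ===== LEMMAS AND PROOFS =====

-- A needle that avoids a char c is a prefix of a ++ c :: b iff it is a prefix of a.
lemma prefix_append_cons {c : Char} {sub : List Char} (hc : c ∉ sub) :
    ∀ (a b : List Char), (sub <+: a ++ c :: b ↔ sub <+: a) := by
  induction sub with
  | nil => intro a b; simp
  | cons s sub' ih =>
    intro a b
    cases a with
    | nil =>
      simp only [List.nil_append]
      constructor
      · rintro ⟨t, ht⟩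
        cases ht
        exact absurd (List.mem_cons_self) hc
      · intro h; exact absurd (List.eq_nil_of_prefix_nil h) (by simp)
    | cons x a' =>
      simp only [List.cons_append, List.cons_prefix_cons]
      have ih' := ih (fun hm => hc (List.mem_cons_of_mem _ hm)) a' b
      exact ⟨fun ⟨hx, hp⟩ => ⟨hx, ih'.1 hp⟩, fun ⟨hx, hp⟩ => ⟨hx, ih'.2 hp⟩⟩

-- A needle that avoids c is an infix of a ++ c :: b iff it is an infix of a or of b.
lemma infix_append_cons {c : Char} {sub : List Char} (hc : c ∉ sub) :
    ∀ (a b : List Char), (sub <:+: a ++ c :: b ↔ sub <:+: a ∨ sub <:+: b) := by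
  intro a
  induction a with
  | nil =>
    intro b
    simp only [List.nil_append]
    constructor
    · intro h
      rcases List.infix_cons_iff.1 h with h | h
      · have h0 : sub <+: ([] : List Char) := (prefix_append_cons hc [] b).1 h
        exact Or.inl (by simp [List.eq_nil_of_prefix_nil h0])
      · exact Or.inr h
    · rintro (h | h)
      · have : sub = [] := List.eq_nil_of_infix_nil h
        exact this ▸ List.infix_cons_iff.2 (Or.inr (this ▸ List.nil_infix))
      · exact List.infix_cons_iff.2 (Or.inr h)
  | cons x a' ih =>
    intro b
    constructor
    · intro h
      rcases List.infix_cons_iff.1 h with h | h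
      · exact Or.inl ((prefix_append_cons hc (x :: a') b).1 h).isInfix
      · rcases (ih b).1 h with h' | h'
        · exact Or.inl (List.infix_cons_iff.2 (Or.inr h'))
        · exact Or.inr h'
    · rintro (h | h)
      · rcases List.infix_cons_iff.1 h with h' | h'
        · exact ((prefix_append_cons hc (x :: a') b).2 h').isInfix
        · exact List.infix_cons_iff.2 (Or.inr ((ih b).2 (Or.inl h')))
      · exact List.infix_cons_iff.2 (Or.inr ((ih b).2 (Or.inr h)))

-- Searching a newline-free needle in the newline-joined blob = searching each part.
lemma chars_isIn_join {sub : List Char} (hc : '\n' ∉ sub) :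
    ∀ (s : List Char) (ss : List (List Char)),
      PySem.Chars.isIn sub (PySem.Chars.join ['\n'] (s :: ss)) =
        (s :: ss).any (fun q => PySem.Chars.isIn sub q) := by
  intro s ss
  induction ss generalizing s with
  | nil => simp [PySem.Chars.join_singleton]
  | cons t ts ih =>
    rw [PySem.Chars.join_cons_cons]
    have h1 : s ++ ['\n'] ++ PySem.Chars.join ['\n'] (t :: ts)
        = s ++ '\n' :: PySem.Chars.join ['\n'] (t :: ts) := by simp
    rw [h1]
    rcases hin : PySem.Chars.isIn sub (s ++ '\n' :: PySem.Chars.join ['\n'] (t :: ts)) with _ | _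
    · have hni := (PySem.Chars.isIn_eq_false_iff _ _).1 hin
      rw [infix_append_cons hc] at hni
      have hs := (PySem.Chars.isIn_eq_false_iff sub s).2 (fun h => hni (Or.inl h))
      have hj := (PySem.Chars.isIn_eq_false_iff sub _).2 (fun h => hni (Or.inr h))
      rw [ih] at hj
      simp only [List.any_cons] at hj ⊢
      simp [hs, hj]
    · have hii := (PySem.Chars.isIn_iff_infix _ _).1 hin
      rw [infix_append_cons hc] at hii
      rcases hii with h | h
      · simp [List.any_cons, (PySem.Chars.isIn_iff_infix sub s).2 h]
      · have hh := (PySem.Chars.isIn_iff_infix sub _).2 h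
        rw [ih] at hh
        simp only [List.any_cons] at hh ⊢
        simp [hh]

-- Str-level form of the previous lemma, for a nonempty list of strings.
lemma str_isIn_join {sub : String} (hc : '\n' ∉ sub.toList) (s : String) (ss : List String) :
    PySem.Str.isIn sub (PySem.Str.join "\n" (s :: ss)) =
      (s :: ss).any (fun q => PySem.Str.isIn sub q) := by
  rw [PySem.Str.isIn_eq, PySem.Str.toList_join]
  have hnl : ("\n" : String).toList = ['\n'] := by decide
  rw [hnl, List.map_cons, chars_isIn_join hc]
  simp [PySem.Str.isIn_eq, Function.comp_def]

-- A path starting with ".claude" contains "claude"; so A's first disjunct collapses.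
lemma startswith_or_isIn (s : String) :
    (PySem.Str.startswith s ".claude" || PySem.Str.isIn "claude" s) = PySem.Str.isIn "claude" s := by
  rcases h : PySem.Str.isIn "claude" s with _ | _
  · simp only [Bool.or_false]
    rcases hs : PySem.Str.startswith s ".claude" with _ | _
    · rfl
    · exfalso
      rw [PySem.Str.startswith_eq] at hs
      have hpre := (PySem.Chars.startswith_iff _ _).1 hs
      rw [PySem.Str.isIn_eq] at h
      exact (PySem.Chars.isIn_eq_false_iff _ _).1 h
        (List.IsInfix.trans (by decide : ("claude" : String).toList <:+: (".claude" : String).toList)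
          hpre.isInfix)
  · simp

-- any distributes over || (used to split A's combined feedback/review predicate).
lemma list_any_or {α : Type} (l : List α) (p q : α → Bool) :
    (l.any fun y => p y || q y) = (l.any p || l.any q) := by
  induction l with
  | nil => rfl
  | cons x t ih =>
    simp only [List.any_cons, ih]
    cases p x <;> cases q x <;> cases t.any p <;> cases t.any q <;> rfl

-- ===== VERDICT (by name: the statement is the Claim_ definition above) =====
theorem trigger_type_py_spec : Claim_equal_trigger_type_py := by
  intro changed_files _
  unfold Spec_trigger_type_py trigger_type_py trigger_type_py_alt
  cases changed_files with
  | nil => simp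
  | cons x xs =>
    have h1 := str_isIn_join (sub := "claude") (by decide)
      (PySem.Str.lower x) (xs.map (fun path => PySem.Str.lower path))
    have h2 := str_isIn_join (sub := "feedback") (by decide)
      (PySem.Str.lower x) (xs.map (fun path => PySem.Str.lower path))
    have h3 := str_isIn_join (sub := "review") (by decide)
      (PySem.Str.lower x) (xs.map (fun path => PySem.Str.lower path))
    simp only [List.map_cons, h1, h2, h3, List.any_cons, List.any_map, Function.comp_def,
      startswith_or_isIn, list_any_or, ne_eq, reduceCtorEq, not_false_iff, if_true, if_false]
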